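-- pv_equiv track=rewrite | github.com/NotBobTheBuilder/advent-of-code | 03.py | count
-- ===== SOURCE A (Python) =====
-- from collections import Counter
--
-- def count(lines):
--     """
--     Produce a list of counters, where at each index, the counter summarises the frequency
--     of characters in the elements of the input list at that index within the element
--
--     counter(['ab'], ['cd']) == [Counter({'a': 1, 'c': 1}), Counter({'b': 1, 'd': 1})]
--     """
--     sums = []
--     for line in lines:
--         for index, value in enumerate(line):
--             if len(sums) <= index:
--                 sums.append(Counter())
--             sums[index][value] += 1
--     return sums
-- ===== SOURCE B (Python) =====
-- from collections import Counter
-- from itertools import zip_longest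
--
--
-- def count(lines):
--     """Column-major: transpose the lines with zip_longest, then build one
--     Counter per column, filtering out the None fill values."""
--     return [Counter(c for c in col if c is not None)
--             for col in zip_longest(*lines)]
-- ===== Notes on version B (the rewrite author's own statement) =====
-- stated objective: idiomatic
-- what changed: Replaces A's row-by-row accumulation (growing the counter list whenever a line is longer than any seen so far) with a column-major pass: transpose the lines via itertools.zip_longest and build one Counter per column in a comprehension, filtering out the None fillers.
import Mathlib
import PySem

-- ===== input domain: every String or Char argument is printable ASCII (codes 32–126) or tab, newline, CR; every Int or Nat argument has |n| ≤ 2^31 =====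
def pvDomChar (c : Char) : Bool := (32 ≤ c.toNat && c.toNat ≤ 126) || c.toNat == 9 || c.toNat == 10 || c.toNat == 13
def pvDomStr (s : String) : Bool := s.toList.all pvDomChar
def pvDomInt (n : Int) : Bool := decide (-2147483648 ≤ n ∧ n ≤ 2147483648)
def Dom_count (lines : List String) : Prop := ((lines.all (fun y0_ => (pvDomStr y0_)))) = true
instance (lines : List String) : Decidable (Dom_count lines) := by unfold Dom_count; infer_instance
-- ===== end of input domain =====

-- B transposes the input (column-major, zip_longest style) and builds one Counter per
-- column, instead of A's row-by-row accumulation that grows the counter list on the fly;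
-- objective: idiomatic. Counters are rendered as their items lists (insertion order).

-- ===== PORT A =====
-- row-major accumulation: for line in lines: for index, value in enumerate(line): …
def count (lines : List String) : List (List (String × Int)) :=
  let sums : List (PySem.Dict Char Int) :=
    lines.foldl (fun sums line =>
      (PySem.List.enumerate line.toList).foldl (fun sums iv =>
        let sums := if (sums.length : Int) ≤ iv.1 then sums ++ [PySem.Dict.empty] else sums
        sums.modify iv.1.toNat (fun d => d.modify iv.2 0 (· + 1))) sums) []
  sums.map (fun d => d.items.map (fun p => (String.ofList [p.1], p.2)))

-- ===== PORT B =====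
-- zip_longest(*lines): the list of columns; a column holds the characters of exactly the
-- lines still long enough (the None fillers are filtered out, here by filterMap head?)
def cols_alt (ls : List (List Char)) : List (List Char) :=
  if ls.all List.isEmpty then []
  else ls.filterMap List.head? :: cols_alt (ls.map List.tail)
termination_by (ls.map List.length).sum
decreasing_by
  rename_i h
  obtain ⟨r, hr, hne⟩ : ∃ r ∈ ls, r ≠ [] := by
    simpa [List.all_eq_true, List.isEmpty_iff] using h
  simp only [List.map_attach_eq_pmap, List.pmap_eq_map]
  rw [List.map_map]
  refine List.sum_lt_sum _ _ (fun x _ => by simp only [Function.comp_apply, List.length_tail]; omega)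
    ⟨r, hr, ?_⟩
  have : 0 < r.length := List.length_pos_of_ne_nil hne
  simp only [Function.comp_apply, List.length_tail]
  omega

def count_alt (lines : List String) : List (List (String × Int)) :=
  (cols_alt (lines.map String.toList)).map
    (fun col => (PySem.Dict.counter col).items.map (fun p => (String.ofList [p.1], p.2)))

-- ===== PRECONDITION & SPEC =====
def Spec_count (lines : List String) (out : List (List (String × Int))) : Prop := out = count_alt lines
instance (lines : List String) (out : List (List (String × Int))) : Decidable (Spec_count lines out) := by unfold Spec_count; infer_instance

-- ===== CLAIM (what is proved, stated in full; the proofs are below) =====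
def Claim_equal_count : Prop := ∀ (lines : List String), Dom_count lines → Spec_count lines (count lines)

-- ===== LEMMAS AND PROOFS =====

-- the body of A's inner loop, named for the proofs
def innerF (sums : List (PySem.Dict Char Int)) (iv : Int × Char) : List (PySem.Dict Char Int) :=
  let sums := if (sums.length : Int) ≤ iv.1 then sums ++ [PySem.Dict.empty] else sums
  sums.modify iv.1.toNat (fun d => d.modify iv.2 0 (· + 1))

-- length of the longest line
def maxLen (ls : List (List Char)) : Nat := ls.foldr (fun r m => max r.length m) 0

-- column i of the input: the i-th character of every line long enough
def colAt (ls : List (List Char)) (i : Nat) : List Char := ls.filterMap (fun r => r[i]?)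

lemma map_getD_range (xs : List (PySem.Dict Char Int)) (d : PySem.Dict Char Int) :
    (List.range xs.length).map (fun i => xs.getD i d) = xs := by
  apply List.ext_getElem
  · simp
  · intro i h1 h2
    simp only [List.getElem_map, List.getElem_range]
    rw [List.getD_eq_getElem _ _ h2]

lemma getD_range_map (f : Nat → PySem.Dict Char Int) (n i : Nat) (d : PySem.Dict Char Int) :
    ((List.range n).map f).getD i d = if i < n then f i else d := by
  split
  · next h =>
    rw [List.getD_eq_getElem _ _ (by simpa using h)]
    simp
  · next h =>
    rw [List.getD_eq_default _ _ (by simp; omega)]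

lemma getD_modify (xs : List (PySem.Dict Char Int)) (n : Nat) (f : PySem.Dict Char Int → PySem.Dict Char Int)
    (i : Nat) (d : PySem.Dict Char Int) :
    (xs.modify n f).getD i d = if i = n ∧ i < xs.length then f (xs.getD i d) else xs.getD i d := by
  by_cases hi : i < xs.length
  · rw [List.getD_eq_getElem _ _ (by simpa using hi), List.getElem_modify,
      List.getD_eq_getElem _ _ hi]
    by_cases h : i = n
    · subst h
      rw [if_pos rfl, if_pos ⟨rfl, hi⟩]
    · rw [if_neg (fun e => h e.symm), if_neg (by tauto)]
  · rw [List.getD_eq_default (xs.modify n f) d (by simp only [List.length_modify]; omega),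
      List.getD_eq_default xs d (by omega), if_neg (fun hc => hi hc.2)]

lemma getD_append_default (xs : List (PySem.Dict Char Int)) (i : Nat) (d : PySem.Dict Char Int) :
    (xs ++ [d]).getD i d = xs.getD i d := by
  have hl : (xs ++ [d]).length = xs.length + 1 := by simp
  by_cases hi : i < xs.length
  · rw [List.getD_eq_getElem (xs ++ [d]) d (by omega), List.getD_eq_getElem xs d hi,
      List.getElem_append_left hi]
  · by_cases he : i = xs.length
    · rw [List.getD_eq_default xs d (by omega), List.getD_eq_getElem (xs ++ [d]) d (by omega)]
      subst he
      simp
    · rw [List.getD_eq_default xs d (by omega), List.getD_eq_default (xs ++ [d]) d (by omega)]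

-- one step of the inner loop: length and entries
lemma innerF_len (sums : List (PySem.Dict Char Int)) (s : Nat) (c : Char) (hs : s ≤ sums.length) :
    (innerF sums ((s : Int), c)).length = max sums.length (s + 1) := by
  simp only [innerF]
  split_ifs with h <;> simp <;> omega

lemma innerF_getD (sums : List (PySem.Dict Char Int)) (s : Nat) (c : Char) (hs : s ≤ sums.length) (i : Nat) :
    (innerF sums ((s : Int), c)).getD i PySem.Dict.empty =
      if i = s then (sums.getD s PySem.Dict.empty).modify c 0 (· + 1)
      else sums.getD i PySem.Dict.empty := by
  simp only [innerF, Int.toNat_natCast]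
  by_cases h : (sums.length : Int) ≤ (s : Int)
  · rw [if_pos h]
    rw [Nat.cast_le] at h
    have he : sums.length = s := by omega
    rw [getD_modify, getD_append_default]
    have hlen : (sums ++ [PySem.Dict.empty]).length = s + 1 := by simp [he]
    rw [hlen]
    by_cases hie : i = s
    · subst hie
      simp
    · rw [if_neg (fun hc => hie hc.1), if_neg hie]
  · rw [if_neg h]
    rw [Nat.cast_le, not_le] at h
    rw [getD_modify]
    by_cases hie : i = s
    · subst hie
      rw [if_pos ⟨rfl, h⟩, if_pos rfl]
    · rw [if_neg (fun hc => hie hc.1), if_neg hie]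

-- the inner loop, characterised: pads sums up to s + len(l) and bumps l's characters in
lemma inner_spec (l : List Char) : ∀ (s : Nat) (sums : List (PySem.Dict Char Int)), s ≤ sums.length →
    (PySem.List.enumerate l (s : Int)).foldl innerF sums =
    (List.range (max sums.length (s + l.length))).map
      (fun i => if s ≤ i ∧ i - s < l.length
                then (sums.getD i PySem.Dict.empty).modify (l.getD (i - s) 'a') 0 (· + 1)
                else sums.getD i PySem.Dict.empty) := by
  induction l with
  | nil =>
    intro s sums hs
    simp only [PySem.List.enumerate_nil, List.foldl_nil, List.length_nil, Nat.add_zero]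
    rw [Nat.max_eq_left hs]
    refine Eq.symm (Eq.trans (List.map_congr_left ?_) (map_getD_range sums PySem.Dict.empty))
    intro i _
    simp
  | cons c l ih =>
    intro s sums hs
    rw [PySem.List.enumerate_cons, List.foldl_cons]
    have hcast : (s : Int) + 1 = ((s + 1 : Nat) : Int) := by push_cast; ring
    rw [hcast]
    have hs' : s + 1 ≤ (innerF sums ((s : Int), c)).length := by
      rw [innerF_len sums s c hs]; omega
    rw [ih (s + 1) _ hs']
    rw [innerF_len sums s c hs]
    have hb : max (max sums.length (s + 1)) (s + 1 + l.length) = max sums.length (s + (c :: l).length) := by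
      simp; omega
    rw [hb]
    apply List.map_congr_left
    intro i hi
    rw [List.mem_range] at hi
    rw [innerF_getD sums s c hs]
    by_cases he : i = s
    · subst he
      have h1 : ¬ (i + 1 ≤ i ∧ i - (i + 1) < l.length) := by omega
      have h2 : i ≤ i ∧ i - i < (c :: l).length := by simp
      rw [if_neg h1, if_pos h2, if_pos rfl]
      simp
    · rw [if_neg he]
      by_cases h1 : s + 1 ≤ i ∧ i - (s + 1) < l.length
      · have h2 : s ≤ i ∧ i - s < (c :: l).length := by simp; omega
        rw [if_pos h1, if_pos h2]
        obtain ⟨k, hk⟩ : ∃ k, i - s = k + 1 := ⟨i - s - 1, by omega⟩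
        rw [hk]
        have : i - (s + 1) = k := by omega
        rw [this]
        rfl
      · have h2 : ¬ (s ≤ i ∧ i - s < (c :: l).length) := by simp at h1 ⊢; omega
        rw [if_neg h1, if_neg h2]

-- maxLen facts
lemma maxLen_append_singleton (ls : List (List Char)) (l : List Char) :
    maxLen (ls ++ [l]) = max (maxLen ls) l.length := by
  induction ls with
  | nil => simp [maxLen]
  | cons r ls ih => simp only [List.cons_append, maxLen, List.foldr_cons] at *; omega

lemma length_le_maxLen {ls : List (List Char)} {r : List Char} (h : r ∈ ls) : r.length ≤ maxLen ls := by
  induction ls with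
  | nil => simp at h
  | cons a ls ih =>
    simp only [maxLen, List.foldr_cons] at *
    rcases List.mem_cons.mp h with h | h
    · subst h; omega
    · have := ih h; omega

lemma colAt_eq_nil_of_maxLen_le (ls : List (List Char)) (i : Nat) (h : maxLen ls ≤ i) :
    colAt ls i = [] := by
  unfold colAt
  rw [List.filterMap_eq_nil_iff]
  intro r hr
  have := length_le_maxLen hr
  rw [List.getElem?_eq_none_iff]
  omega

lemma colAt_append_singleton (ls : List (List Char)) (l : List Char) (i : Nat) :
    colAt (ls ++ [l]) i = colAt ls i ++ (if i < l.length then [l.getD i 'a'] else []) := by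
  unfold colAt
  rw [List.filterMap_append]
  congr 1
  simp only [List.filterMap_cons, List.filterMap_nil]
  split_ifs with h
  · rw [List.getElem?_eq_getElem h, List.getD_eq_getElem l 'a' h]
  · rw [List.getElem?_eq_none (by omega)]

-- the A-side core computes the per-column counters
lemma outer_spec (lines : List (List Char)) :
    lines.foldl (fun sums line => (PySem.List.enumerate line).foldl innerF sums) [] =
    (List.range (maxLen lines)).map (fun i => PySem.Dict.counter (colAt lines i)) := by
  induction lines using List.reverseRecOn with
  | nil => simp [maxLen]
  | append_singleton lines l ih =>
    rw [List.foldl_append, List.foldl_cons, List.foldl_nil, ih]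
    have h0 : PySem.List.enumerate l = PySem.List.enumerate l ((0 : Nat) : Int) := by norm_num
    rw [h0, inner_spec l 0 _ (Nat.zero_le _)]
    simp only [List.length_map, List.length_range, Nat.zero_add, Nat.sub_zero]
    rw [maxLen_append_singleton]
    apply List.map_congr_left
    intro i hi
    rw [List.mem_range] at hi
    have hgd : ((List.range (maxLen lines)).map (fun i => PySem.Dict.counter (colAt lines i))).getD i PySem.Dict.empty
        = PySem.Dict.counter (colAt lines i) := by
      rw [getD_range_map]
      split_ifs with h
      · rfl
      · rw [colAt_eq_nil_of_maxLen_le lines i (by omega)]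
        rfl
    rw [colAt_append_singleton]
    by_cases h : i < l.length
    · rw [if_pos (by omega : 0 ≤ i ∧ i < l.length), if_pos h, hgd,
        PySem.Dict.counter_append_singleton]
    · rw [if_neg (by omega), if_neg h, hgd, List.append_nil]

lemma maxLen_eq_zero_of_all_nil (ls : List (List Char)) (h : ∀ r ∈ ls, r = []) : maxLen ls = 0 := by
  induction ls with
  | nil => simp [maxLen]
  | cons a t iht =>
    have ha : a = [] := h a (by simp)
    have ht := iht (fun r hr => h r (by simp [hr]))
    simp only [maxLen, List.foldr_cons] at *
    simp [ha, ht]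

lemma maxLen_map_tail (ls : List (List Char)) : maxLen (ls.map List.tail) = maxLen ls - 1 := by
  induction ls with
  | nil => simp [maxLen]
  | cons a t iht =>
    simp only [maxLen, List.map_cons, List.foldr_cons] at *
    rw [List.length_tail]
    omega

-- the B-side transpose is exactly the list of columns
lemma cols_alt_spec (ls : List (List Char)) :
    cols_alt ls = (List.range (maxLen ls)).map (colAt ls) := by
  suffices H : ∀ (n : Nat) (ls : List (List Char)), (ls.map List.length).sum = n →
      cols_alt ls = (List.range (maxLen ls)).map (colAt ls) by exact H _ ls rfl
  intro n
  induction n using Nat.strong_induction_on with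
  | _ n ihn =>
  intro ls hn
  by_cases h : ls.all List.isEmpty
  · rw [cols_alt.eq_def, if_pos h]
    have : maxLen ls = 0 := by
      apply maxLen_eq_zero_of_all_nil
      simpa [List.all_eq_true, List.isEmpty_iff] using h
    simp [this]
  · obtain ⟨r, hr, hne⟩ : ∃ r ∈ ls, r ≠ [] := by
      simpa [List.all_eq_true, List.isEmpty_iff] using h
    have hrpos : 0 < r.length := List.length_pos_of_ne_nil hne
    have hdec : ((ls.map List.tail).map List.length).sum < n := by
      rw [List.map_map, ← hn]
      refine List.sum_lt_sum _ _ (fun x _ => by simp) ⟨r, hr, ?_⟩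
      simp only [Function.comp_apply, List.length_tail]
      omega
    have ih := ihn _ hdec (ls.map List.tail) rfl
    rw [cols_alt.eq_def, if_neg h, ih]
    have hpos : 0 < maxLen ls := by
      have := length_le_maxLen hr
      omega
    have htail : maxLen (ls.map List.tail) = maxLen ls - 1 := maxLen_map_tail ls
    have hcol : ∀ i, colAt (ls.map List.tail) i = colAt ls (i + 1) := by
      intro i
      unfold colAt
      rw [List.filterMap_map]
      apply List.filterMap_congr
      intro r _
      simp [List.getElem?_tail]
    have hhead : ls.filterMap List.head? = colAt ls 0 := by
      unfold colAt
      apply List.filterMap_congr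
      intro r _
      simp [List.head?_eq_getElem?]
    obtain ⟨m, hm⟩ : ∃ m, maxLen ls = m + 1 := ⟨maxLen ls - 1, by omega⟩
    rw [hm, htail, hm, Nat.add_sub_cancel, List.range_succ_eq_map]
    simp only [List.map_cons, List.map_map]
    rw [hhead]
    congr 1
    apply List.map_congr_left
    intro i _
    simp only [Function.comp_apply]
    rw [hcol]

-- ===== VERDICT (by name: the statement is the Claim_ definition above) =====
theorem count_spec : Claim_equal_count := by
  intro lines _
  unfold Spec_count count count_alt
  rw [cols_alt_spec]
  have hA : lines.foldl (fun sums line =>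
      (PySem.List.enumerate line.toList).foldl (fun sums iv =>
        let sums := if (sums.length : Int) ≤ iv.1 then sums ++ [PySem.Dict.empty] else sums
        sums.modify iv.1.toNat (fun d => d.modify iv.2 0 (· + 1))) sums) [] =
      (lines.map String.toList).foldl (fun sums line => (PySem.List.enumerate line).foldl innerF sums) [] := by
    rw [List.foldl_map]
    rfl
  rw [hA, outer_spec, List.map_map, List.map_map]
  rfl
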